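-- pv_equiv track=rewrite | github.com/ASSERT-KTH/Mokav | experiments/pynguin/c4b/return-lst/generated_tests/src_2414/2/src_2414.py | func
-- ===== SOURCE A (Python) =====
-- def func(*args):
-- 	ret_values = []
--
-- 	l = ['Sheldon', 'Leonard', 'Penny', 'Rajesh', 'Howard']
-- 	n = int(args[0].strip())
-- 	i = 1
-- 	while ((i * 5) < n):
-- 	    n -= (i * 5)
-- 	    i *= 2
-- 	ret_values.append(l[((n - 1) // i)])
--
-- 	return ret_values
-- ===== SOURCE B (Python) =====
-- def func(*args):
--     ret_values = []
--     l = ['Sheldon', 'Leonard', 'Penny', 'Rajesh', 'Howard']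
--     n = int(args[0].strip())
--     q = (n - 1) // 5
--     k = max(0, (q + 1).bit_length() - 1)
--     i = 1 << k
--     rem = n - 5 * (i - 1)
--     ret_values.append(l[(rem - 1) // i])
--     return ret_values
-- ===== Notes on version B (the rewrite author's own statement) =====
-- stated objective: alternative
-- what changed: Replaces the iterative while-loop doubling (subtract 5*i, double i) by a closed-form computation: q=(n-1)//5, k=max(0,(q+1).bit_length()-1), i=1<<k, then index (n-5*(i-1)-1)//i.
import Mathlib
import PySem

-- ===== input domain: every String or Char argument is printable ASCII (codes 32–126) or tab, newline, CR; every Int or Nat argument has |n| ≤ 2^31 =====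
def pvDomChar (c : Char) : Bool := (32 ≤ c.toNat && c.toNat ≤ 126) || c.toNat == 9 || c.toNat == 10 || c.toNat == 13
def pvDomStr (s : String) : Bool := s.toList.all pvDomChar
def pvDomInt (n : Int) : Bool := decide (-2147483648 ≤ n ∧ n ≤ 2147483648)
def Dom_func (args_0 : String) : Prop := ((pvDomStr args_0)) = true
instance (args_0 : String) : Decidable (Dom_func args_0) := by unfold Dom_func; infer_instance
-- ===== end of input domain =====

-- B replaces A's doubling while-loop by a closed-form bit_length computation of the same block (alternative decomposition, same result).

-- ===== PORT A =====
-- A's while-loop: while i*5 < n: n -= i*5; i *= 2   (0 < i is an invariant of A's loop, carried for termination)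
def pvLoopA (n i : Int) (hi : 0 < i) : Int × Int :=
  if h : i * 5 < n then pvLoopA (n - i * 5) (i * 2) (by omega) else (n, i)
termination_by n.toNat
decreasing_by omega

def func (args_0 : String) : List String :=
  let l := ["Sheldon", "Leonard", "Penny", "Rajesh", "Howard"]
  match PySem.Int.ofStr? (PySem.Str.strip args_0) with
  | none => []          -- int() raises ValueError here; excluded by Pre_func
  | some n =>
    let ni := pvLoopA n 1 (by norm_num)
    match PySem.List.pyGet? l (PySem.Int.floordiv (ni.1 - 1) ni.2) with
    | none => []        -- l[...] raises IndexError here; excluded by Pre_func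
    | some x => [x]

-- ===== PORT B =====
def func_alt (args_0 : String) : List String :=
  let l := ["Sheldon", "Leonard", "Penny", "Rajesh", "Howard"]
  match PySem.Int.ofStr? (PySem.Str.strip args_0) with
  | none => []          -- int() raises ValueError here; excluded by Pre_func
  | some n =>
    let q := PySem.Int.floordiv (n - 1) 5
    -- Nat subtraction is exactly Python's max(0, bit_length - 1)
    let k : Nat := PySem.Int.bitLength (q + 1) - 1
    let i : Int := (1 : Int) <<< k
    let rem := n - 5 * (i - 1)
    match PySem.List.pyGet? l (PySem.Int.floordiv (rem - 1) i) with
    | none => []        -- l[...] raises IndexError here; excluded by Pre_func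
    | some x => [x]

-- ===== PRECONDITION & SPEC =====
-- Pre_: exactly the inputs on which Python A returns normally: the stripped string parses as an
-- int (else int() raises ValueError) and its value n is ≥ -4 (else the final index is ≤ -6 and
-- l[...] raises IndexError); getD (-5) makes the parse-failure case fail the bound.
def Pre_func (args_0 : String) : Prop :=
  -4 ≤ (PySem.Int.ofStr? (PySem.Str.strip args_0)).getD (-5)
instance (args_0 : String) : Decidable (Pre_func args_0) := by unfold Pre_func; infer_instance

def pvWitness_func : String := "7"

def Spec_func (args_0 : String) (out : List String) : Prop := out = func_alt args_0
instance (args_0 : String) (out : List String) : Decidable (Spec_func args_0 out) := by unfold Spec_func; infer_instance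

-- ===== CLAIM (what is proved, stated in full; the proofs are below) =====
def Claim_equal_func : Prop := ∀ (args_0 : String), Dom_func args_0 → Pre_func args_0 → Spec_func args_0 (func args_0)

-- ===== LEMMAS AND PROOFS =====

-- closed-form characterisation of A's loop: it subtracts 5*i*(2^m-1) and multiplies i by 2^m,
-- stopping as soon as 5*i' ≥ n', having run (m=0 or the last entry test was true)
lemma pvLoopA_spec (n i : Int) (hi : 0 < i) :
    ∃ m : Nat, pvLoopA n i hi = (n - 5 * i * (2 ^ m - 1), i * 2 ^ m) ∧
      n ≤ 5 * i * (2 ^ (m + 1) - 1) ∧ (m = 0 ∨ 5 * i * (2 ^ m - 1) < n) := by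
  fun_induction pvLoopA n i hi with
  | case1 n i hi h ih =>
    obtain ⟨m, he, hb, hc⟩ := ih
    refine ⟨m + 1, ?_, ?_, ?_⟩
    · rw [he]; simp only [Prod.mk.injEq]; constructor <;> ring
    · ring_nf at hb ⊢; linarith
    · right
      rcases hc with h0 | hlt
      · subst h0; norm_num; linarith
      · ring_nf at hlt ⊢; linarith
  | case2 n i hi h =>
    refine ⟨0, by simp, by norm_num; linarith, Or.inl rfl⟩

-- bit_length of an x with 2^m ≤ x < 2^(m+1) is m+1
lemma pvBitLength_bracket (x : Int) (m : Nat) (h1 : 2 ^ m ≤ x) (h2 : x < 2 ^ (m + 1)) :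
    PySem.Int.bitLength x = m + 1 := by
  have hx0 : 0 < x := lt_of_lt_of_le (by positivity) h1
  have hxne : x ≠ 0 := by omega
  have habs : x.natAbs < 2 ^ PySem.Int.bitLength x := PySem.Int.lt_two_pow_bitLength x
  have hle : 2 ^ (PySem.Int.bitLength x - 1) ≤ x.natAbs := PySem.Int.two_pow_bitLength_le x hxne
  have h1' : 2 ^ m ≤ x.natAbs := by
    have : ((2:Int) ^ m) = ((2 ^ m : Nat) : Int) := by push_cast; ring
    omega
  have h2' : x.natAbs < 2 ^ (m + 1) := by
    have : ((2:Int) ^ (m+1)) = ((2 ^ (m+1) : Nat) : Int) := by push_cast; ring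
    omega
  have hge : m + 1 ≤ PySem.Int.bitLength x := by
    by_contra hlt
    have : 2 ^ PySem.Int.bitLength x ≤ 2 ^ m := Nat.pow_le_pow_right (by norm_num) (by omega)
    omega
  have hle2 : PySem.Int.bitLength x ≤ m + 1 := by
    by_contra hgt
    have : 2 ^ (m + 1) ≤ 2 ^ (PySem.Int.bitLength x - 1) := Nat.pow_le_pow_right (by norm_num) (by omega)
    omega
  omega

-- for n ≥ -4 the loop's result equals B's closed form
lemma pv_core (n : Int) (hn : -4 ≤ n) :
    pvLoopA n 1 (by norm_num) = (n - 5 * ((1:Int) <<< (PySem.Int.bitLength (PySem.Int.floordiv (n - 1) 5 + 1) - 1) - 1),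
      (1:Int) <<< (PySem.Int.bitLength (PySem.Int.floordiv (n - 1) 5 + 1) - 1)) := by
  obtain ⟨m, he, hb, hc⟩ := pvLoopA_spec n 1 (by norm_num)
  set q := PySem.Int.floordiv (n - 1) 5 with hq
  have hqlt : q + 1 < 2 ^ (m + 1) := by
    have : q < 2 ^ (m + 1) - 1 := by
      rw [hq, PySem.Int.floordiv_lt_iff_lt_mul (by norm_num)]
      linarith
    omega
  have hk : PySem.Int.bitLength (q + 1) - 1 = m := by
    rcases hc with h0 | hlt
    · subst h0
      have hq0 : -1 ≤ q := by
        rw [hq]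
        rw [PySem.Int.le_floordiv_iff_mul_le (by norm_num)]
        linarith
      norm_num at hqlt
      interval_cases q
      · simp [PySem.Int.bitLength_zero]
      · decide
    · have hm1 : 2 ^ m ≤ q + 1 := by
        have : (2:Int) ^ m - 1 ≤ q := by
          rw [hq, PySem.Int.le_floordiv_iff_mul_le (by norm_num)]
          linarith
        omega
      rw [pvBitLength_bracket (q + 1) m hm1 hqlt]
      omega
  rw [hk, he]
  have hsh : (1:Int) <<< m = 2 ^ m := by simp [Int.shiftLeft_eq]
  rw [hsh]
  simp only [Prod.mk.injEq]
  constructor <;> ring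

-- ===== VERDICT (by name: the statement is the Claim_ definition above) =====
theorem func_spec : Claim_equal_func := by

  intro s _ hpre
  unfold Spec_func func func_alt
  cases hsome : PySem.Int.ofStr? (PySem.Str.strip s) with
  | none => simp [Pre_func, hsome] at hpre
  | some n =>
    have hn : -4 ≤ n := by simpa [Pre_func, hsome] using hpre
    dsimp only
    rw [pv_core n hn]
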